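-- pv_equiv track=rewrite | github.com/wbopan/flashtrace | exp/case_study/run_ifr_case.py | build_raw_roles
-- ===== SOURCE A (Python) =====
-- from typing import Any, Dict, List, Optional, Sequence, Tuple
--
-- def build_raw_roles(
--     tokens: Sequence[str],
--     prompt_len_full: int,
--     user_indices: Sequence[int],
--     template_indices: Sequence[int],
--     thinking_span_abs: Optional[Sequence[int]],
--     sink_span_abs: Optional[Sequence[int]],
-- ) -> List[str]:
--     """Assign role labels for raw tokens (template + user + generation)."""
--
--     roles = ["template" for _ in range(len(tokens))]
--     user_set = set(int(i) for i in user_indices)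
--     tmpl_set = set(int(i) for i in template_indices)
--
--     for i in range(min(len(tokens), prompt_len_full)):
--         if i in user_set:
--             roles[i] = "user"
--         elif i in tmpl_set:
--             roles[i] = "template"
--         else:
--             roles[i] = "prompt"
--
--     for i in range(prompt_len_full, len(tokens)):
--         roles[i] = "gen"
--
--     if thinking_span_abs is not None:
--         start, end = int(thinking_span_abs[0]), int(thinking_span_abs[1])
--         for i in range(start, min(len(tokens), end + 1)):
--             roles[i] = "think"
--
--     if sink_span_abs is not None:
--         start, end = int(sink_span_abs[0]), int(sink_span_abs[1])
--         for i in range(start, min(len(tokens), end + 1)):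
--             roles[i] = "output"
--
--     return roles
-- ===== SOURCE B (Python) =====
-- from typing import List, Optional, Sequence
--
--
-- def build_raw_roles(
--     tokens: Sequence[str],
--     prompt_len_full: int,
--     user_indices: Sequence[int],
--     template_indices: Sequence[int],
--     thinking_span_abs: Optional[Sequence[int]],
--     sink_span_abs: Optional[Sequence[int]],
-- ) -> List[str]:
--     """Single forward pass: each position's final label is picked by precedence
--     (sink > think > gen > user/template/prompt), with each span clipped to the
--     token list as the half-open range it describes."""
--     n = len(tokens)
--     user_set = {int(i) for i in user_indices}
--     tmpl_set = {int(i) for i in template_indices}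
--
--     def span_range(span):
--         if span is None:
--             return range(0)
--         return range(max(int(span[0]), 0), min(n, int(span[1]) + 1))
--
--     sink = span_range(sink_span_abs)
--     think = span_range(thinking_span_abs)
--
--     roles = []
--     for i in range(n):
--         if i in sink:
--             roles.append("output")
--         elif i in think:
--             roles.append("think")
--         elif i >= prompt_len_full:
--             roles.append("gen")
--         elif i in user_set:
--             roles.append("user")
--         elif i in tmpl_set:
--             roles.append("template")
--         else:
--             roles.append("prompt")
--     return roles
-- ===== Notes on version B (the rewrite author's own statement) =====
-- stated objective: simpler
-- what changed: Replaces A's five sequential in-place overwrite passes over a roles array with a single forward pass that picks each position's final label by precedence (sink > think > gen > user/template/prompt), treating each span as its half-open range clipped to the token list.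
-- intended difference: When a think/sink span has a negative absolute start (and the span's clipped end stops before the last token), A's range loop writes through Python's negative-index wraparound and relabels tokens at the END of the list; B labels only the clipped interval [start, end], which is the intended reading of an absolute span. — e.g. on build_raw_roles(["a", "b", "c"], 3, [], [], none, some [-1, 0]): A returns ["output", "prompt", "output"], B returns ["output", "prompt", "prompt"]
import Mathlib
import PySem

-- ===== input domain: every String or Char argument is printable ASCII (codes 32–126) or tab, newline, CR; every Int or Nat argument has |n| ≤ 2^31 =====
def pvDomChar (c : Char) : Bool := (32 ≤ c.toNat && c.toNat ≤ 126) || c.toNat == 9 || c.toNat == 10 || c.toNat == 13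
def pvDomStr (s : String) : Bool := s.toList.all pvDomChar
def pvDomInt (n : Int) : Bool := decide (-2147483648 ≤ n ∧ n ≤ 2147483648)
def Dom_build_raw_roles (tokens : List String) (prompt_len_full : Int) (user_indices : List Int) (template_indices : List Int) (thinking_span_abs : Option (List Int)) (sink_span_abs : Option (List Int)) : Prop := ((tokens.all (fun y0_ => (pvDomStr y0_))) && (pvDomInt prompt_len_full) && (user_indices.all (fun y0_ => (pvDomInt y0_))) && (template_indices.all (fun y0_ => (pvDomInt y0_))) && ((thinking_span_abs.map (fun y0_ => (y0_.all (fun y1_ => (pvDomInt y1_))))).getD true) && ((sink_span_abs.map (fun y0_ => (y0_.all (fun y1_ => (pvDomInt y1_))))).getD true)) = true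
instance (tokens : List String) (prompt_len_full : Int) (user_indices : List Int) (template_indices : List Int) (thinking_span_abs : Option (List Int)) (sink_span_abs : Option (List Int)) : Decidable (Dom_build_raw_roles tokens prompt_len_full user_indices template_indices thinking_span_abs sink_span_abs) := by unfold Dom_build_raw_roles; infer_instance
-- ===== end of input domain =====

-- B replaces A's five sequential overwrite passes with one forward pass picking each
-- position's label by precedence (objective: simpler); on spans with a negative absolute
-- start A relabels tokens at the end of the list through wraparound, B labels only the
-- clipped interval (stated as D_ below). Equivalence is about the return value; A mutates
-- only its own local list.

-- ===== PORT A =====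
-- 'for i in range(s, e): roles[i] = v'  (pySetD = Python list assignment with negative-index
-- wraparound; total no-op where Python raises IndexError — those inputs are outside Pre_)
def pvSpanWrite (roles : List String) (v : String) (s e : Int) : List String :=
  (PySem.List.pyRange s e 1).foldl (fun r i => PySem.List.pySetD r i v) roles

-- 'if span is not None: start, end = span[0], span[1]; for i in range(start, min(n, end+1)): roles[i] = v'
def pvSpanPass (roles : List String) (v : String) (n : Int) (span : Option (List Int)) : List String :=
  match span with
  | none => roles
  | some sp => pvSpanWrite roles v (PySem.List.pyGetD sp 0 0) (min n (PySem.List.pyGetD sp 1 0 + 1))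

def build_raw_roles (tokens : List String) (prompt_len_full : Int) (user_indices : List Int) (template_indices : List Int) (thinking_span_abs : Option (List Int)) (sink_span_abs : Option (List Int)) : List String :=
  let n : Int := tokens.length
  let roles0 := (PySem.List.pyRange 0 n 1).map (fun _ => "template")
  let user_set := PySem.Set.ofList user_indices
  let tmpl_set := PySem.Set.ofList template_indices
  -- first loop: user / template / prompt on the prompt region
  let roles1 := (PySem.List.pyRange 0 (min n prompt_len_full) 1).foldl
    (fun r i => PySem.List.pySetD r i
      (if user_set.contains i then "user"
       else if tmpl_set.contains i then "template"
       else "prompt")) roles0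
  -- second loop: gen
  let roles2 := pvSpanWrite roles1 "gen" prompt_len_full n
  -- thinking span (span[0] / span[1]; Pre_ guarantees length ≥ 2)
  let roles3 := pvSpanPass roles2 "think" n thinking_span_abs
  -- sink span
  pvSpanPass roles3 "output" n sink_span_abs

-- ===== PORT B =====
-- 'i in span_range(span)' where span_range(span) = range(max(span[0],0), min(n, span[1]+1))
def pvSpanCov (n : Int) (span : Option (List Int)) (i : Int) : Bool :=
  match span with
  | none => false
  | some sp =>
    let s := max (PySem.List.pyGetD sp 0 0) 0
    let e := min n (PySem.List.pyGetD sp 1 0 + 1)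
    decide (s ≤ i) && decide (i < e)

def build_raw_roles_alt (tokens : List String) (prompt_len_full : Int) (user_indices : List Int) (template_indices : List Int) (thinking_span_abs : Option (List Int)) (sink_span_abs : Option (List Int)) : List String :=
  let n : Int := tokens.length
  let user_set := PySem.Set.ofList user_indices
  let tmpl_set := PySem.Set.ofList template_indices
  (PySem.List.pyRange 0 n 1).map (fun i =>
    if pvSpanCov n sink_span_abs i then "output"
    else if pvSpanCov n thinking_span_abs i then "think"
    else if decide (prompt_len_full ≤ i) then "gen"
    else if user_set.contains i then "user"
    else if tmpl_set.contains i then "template"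
    else "prompt")

-- ===== PRECONDITION & SPEC =====
-- Pre_ excludes exactly the inputs where Python A raises IndexError: a span list with fewer
-- than two elements, a nonempty span write loop whose start is below -len(tokens), or
-- prompt_len_full below -len(tokens) (the gen loop's first write).
def pvSpanPre (n : Int) (span : Option (List Int)) : Prop :=
  match span with
  | none => True
  | some sp => 2 ≤ sp.length ∧
      (-n ≤ PySem.List.pyGetD sp 0 0 ∨ min n (PySem.List.pyGetD sp 1 0 + 1) ≤ PySem.List.pyGetD sp 0 0)

def Pre_build_raw_roles (tokens : List String) (prompt_len_full : Int) (user_indices : List Int) (template_indices : List Int) (thinking_span_abs : Option (List Int)) (sink_span_abs : Option (List Int)) : Prop :=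
  -(tokens.length : Int) ≤ prompt_len_full ∧
  pvSpanPre (tokens.length : Int) thinking_span_abs ∧
  pvSpanPre (tokens.length : Int) sink_span_abs

instance (tokens : List String) (prompt_len_full : Int) (user_indices : List Int) (template_indices : List Int) (thinking_span_abs : Option (List Int)) (sink_span_abs : Option (List Int)) : Decidable (Pre_build_raw_roles tokens prompt_len_full user_indices template_indices thinking_span_abs sink_span_abs) := by
  unfold Pre_build_raw_roles pvSpanPre; rcases thinking_span_abs <;> rcases sink_span_abs <;> infer_instance

def pvWitness_build_raw_roles : List String × Int × List Int × List Int × Option (List Int) × Option (List Int) :=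
  (["a", "b", "c", "d"], 2, [0], [1], some [2, 3], some [3, 3])

-- When a think/sink span has a negative absolute start (and its clipped end stops before the
-- last token), A's range loop writes through Python's negative-index wraparound and relabels
-- tokens at the END of the list; B labels only the clipped interval [start, end], which is
-- the intended reading of an absolute span.
def pvBadSpanB (n : Int) (span : Option (List Int)) : Bool :=
  match span with
  | some (s :: e :: _) => decide (s < 0) && decide (s ≤ e) && decide (e + 1 < n)
  | _ => false
def pvBadSpan (n : Int) (span : Option (List Int)) : Prop := pvBadSpanB n span = true

def D_build_raw_roles (tokens : List String) (prompt_len_full : Int) (user_indices : List Int) (template_indices : List Int) (thinking_span_abs : Option (List Int)) (sink_span_abs : Option (List Int)) : Prop :=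
  pvBadSpan (tokens.length : Int) thinking_span_abs ∨ pvBadSpan (tokens.length : Int) sink_span_abs

instance (tokens : List String) (prompt_len_full : Int) (user_indices : List Int) (template_indices : List Int) (thinking_span_abs : Option (List Int)) (sink_span_abs : Option (List Int)) : Decidable (D_build_raw_roles tokens prompt_len_full user_indices template_indices thinking_span_abs sink_span_abs) := by
  unfold D_build_raw_roles pvBadSpan; infer_instance

def Spec_build_raw_roles (tokens : List String) (prompt_len_full : Int) (user_indices : List Int) (template_indices : List Int) (thinking_span_abs : Option (List Int)) (sink_span_abs : Option (List Int)) (out : List String) : Prop := ¬ D_build_raw_roles tokens prompt_len_full user_indices template_indices thinking_span_abs sink_span_abs → out = build_raw_roles_alt tokens prompt_len_full user_indices template_indices thinking_span_abs sink_span_abs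
instance (tokens : List String) (prompt_len_full : Int) (user_indices : List Int) (template_indices : List Int) (thinking_span_abs : Option (List Int)) (sink_span_abs : Option (List Int)) (out : List String) : Decidable (Spec_build_raw_roles tokens prompt_len_full user_indices template_indices thinking_span_abs sink_span_abs out) := by unfold Spec_build_raw_roles; infer_instance

def pvDiffWitness_build_raw_roles : List String × Int × List Int × List Int × Option (List Int) × Option (List Int) :=
  (["a", "b", "c"], 3, [], [], none, some [-1, 0])

def pvDiffWitnessOut_build_raw_roles : (List String) × (List String) :=
  (["output", "prompt", "output"], ["output", "prompt", "prompt"])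

-- ===== CLAIM (what is proved, stated in full; the proofs are below) =====
def Claim_unchanged_build_raw_roles : Prop := ∀ (tokens : List String) (prompt_len_full : Int) (user_indices : List Int) (template_indices : List Int) (thinking_span_abs : Option (List Int)) (sink_span_abs : Option (List Int)), Dom_build_raw_roles tokens prompt_len_full user_indices template_indices thinking_span_abs sink_span_abs → Pre_build_raw_roles tokens prompt_len_full user_indices template_indices thinking_span_abs sink_span_abs → Spec_build_raw_roles tokens prompt_len_full user_indices template_indices thinking_span_abs sink_span_abs (build_raw_roles tokens prompt_len_full user_indices template_indices thinking_span_abs sink_span_abs)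
def Claim_changed_build_raw_roles : Prop := Dom_build_raw_roles (pvDiffWitness_build_raw_roles.1) (pvDiffWitness_build_raw_roles.2.1) (pvDiffWitness_build_raw_roles.2.2.1) (pvDiffWitness_build_raw_roles.2.2.2.1) (pvDiffWitness_build_raw_roles.2.2.2.2.1) (pvDiffWitness_build_raw_roles.2.2.2.2.2) ∧ Pre_build_raw_roles (pvDiffWitness_build_raw_roles.1) (pvDiffWitness_build_raw_roles.2.1) (pvDiffWitness_build_raw_roles.2.2.1) (pvDiffWitness_build_raw_roles.2.2.2.1) (pvDiffWitness_build_raw_roles.2.2.2.2.1) (pvDiffWitness_build_raw_roles.2.2.2.2.2) ∧ D_build_raw_roles (pvDiffWitness_build_raw_roles.1) (pvDiffWitness_build_raw_roles.2.1) (pvDiffWitness_build_raw_roles.2.2.1) (pvDiffWitness_build_raw_roles.2.2.2.1) (pvDiffWitness_build_raw_roles.2.2.2.2.1) (pvDiffWitness_build_raw_roles.2.2.2.2.2) ∧ build_raw_roles (pvDiffWitness_build_raw_roles.1) (pvDiffWitness_build_raw_roles.2.1) (pvDiffWitness_build_raw_roles.2.2.1) (pvDiffWitness_build_raw_roles.2.2.2.1)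 (pvDiffWitness_build_raw_roles.2.2.2.2.1) (pvDiffWitness_build_raw_roles.2.2.2.2.2) = pvDiffWitnessOut_build_raw_roles.1 ∧ build_raw_roles_alt (pvDiffWitness_build_raw_roles.1) (pvDiffWitness_build_raw_roles.2.1) (pvDiffWitness_build_raw_roles.2.2.1) (pvDiffWitness_build_raw_roles.2.2.2.1) (pvDiffWitness_build_raw_roles.2.2.2.2.1) (pvDiffWitness_build_raw_roles.2.2.2.2.2) = pvDiffWitnessOut_build_raw_roles.2 ∧ pvDiffWitnessOut_build_raw_roles.1 ≠ pvDiffWitnessOut_build_raw_roles.2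

-- ===== LEMMAS AND PROOFS =====

theorem pvWitness_ok : Dom_build_raw_roles pvWitness_build_raw_roles.1 pvWitness_build_raw_roles.2.1 pvWitness_build_raw_roles.2.2.1 pvWitness_build_raw_roles.2.2.2.1 pvWitness_build_raw_roles.2.2.2.2.1 pvWitness_build_raw_roles.2.2.2.2.2 ∧ Pre_build_raw_roles pvWitness_build_raw_roles.1 pvWitness_build_raw_roles.2.1 pvWitness_build_raw_roles.2.2.1 pvWitness_build_raw_roles.2.2.2.1 pvWitness_build_raw_roles.2.2.2.2.1 pvWitness_build_raw_roles.2.2.2.2.2 := by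
  constructor <;> decide

-- list assignment with Python's negative-index wraparound, read back at a valid position
theorem getElem?_pySetD {α : Type} (xs : List α) (i : Int) (v : α) (j : Nat) (hj : j < xs.length) :
    (PySem.List.pySetD xs i v)[j]? = if i = (j:Int) ∨ i = (j:Int) - xs.length then some v else xs[j]? := by
  simp only [PySem.List.pySetD, PySem.List.pySet?, PySem.List.pyIdx?]
  split_ifs with h1 h2 h3 h3 h4 h5 h5 <;> simp_all [List.getElem_set] <;> omega

theorem length_foldl_pySetD {α : Type} (l : List Int) (xs : List α) (f : Int → α) :
    (l.foldl (fun r i => PySem.List.pySetD r i (f i)) xs).length = xs.length := by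
  induction l generalizing xs with
  | nil => rfl
  | cons a t ih => simp [List.foldl_cons, ih, PySem.List.length_pySetD]

-- a constant-valued write loop: position j ends as v iff some loop index hits j
theorem getElem?_foldl_pySetD_const {α : Type} (l : List Int) (xs : List α) (v : α) (j : Nat)
    (hj : j < xs.length) :
    (l.foldl (fun r i => PySem.List.pySetD r i v) xs)[j]? =
      if ∃ i ∈ l, i = (j:Int) ∨ i = (j:Int) - xs.length then some v else xs[j]? := by
  induction l generalizing xs with
  | nil => simp
  | cons a t ih =>
    have hlen : (PySem.List.pySetD xs a v).length = xs.length := PySem.List.length_pySetD ..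
    rw [List.foldl_cons, ih _ (by omega)]
    rw [getElem?_pySetD xs a v j hj, hlen]
    by_cases ha : a = (j:Int) ∨ a = (j:Int) - xs.length <;> simp [ha]

-- a write loop over nonnegative indices with a per-index value
theorem getElem?_foldl_pySetD_fun {α : Type} (l : List Int) (hnn : ∀ i ∈ l, 0 ≤ i)
    (xs : List α) (f : Int → α) (j : Nat) (hj : j < xs.length) :
    (l.foldl (fun r i => PySem.List.pySetD r i (f i)) xs)[j]? =
      if (j:Int) ∈ l then some (f j) else xs[j]? := by
  induction l generalizing xs with
  | nil => simp
  | cons a t ih =>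
    have hlen : (PySem.List.pySetD xs a (f a)).length = xs.length := PySem.List.length_pySetD ..
    rw [List.foldl_cons, ih (fun i hi => hnn i (List.mem_cons_of_mem a hi)) _ (by omega)]
    rw [getElem?_pySetD xs a (f a) j hj]
    have ha0 : 0 ≤ a := hnn a List.mem_cons_self
    by_cases ha : a = (j:Int)
    · subst ha; simp
    · have hne : ¬(a = (j:Int) ∨ a = (j:Int) - xs.length) := by
        rintro (h | h); exact ha h; omega
      rw [if_neg hne]
      have hja : ¬((j:Int) = a) := fun h => ha h.symm
      simp [List.mem_cons, hja]

theorem getElem?_pvSpanWrite (roles : List String) (v : String) (s e : Int) (j : Nat)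
    (hj : j < roles.length) :
    (pvSpanWrite roles v s e)[j]? =
      if (s ≤ (j:Int) ∧ (j:Int) < e) ∨ (s ≤ (j:Int) - roles.length ∧ (j:Int) - roles.length < e)
      then some v else roles[j]? := by
  rw [pvSpanWrite, getElem?_foldl_pySetD_const _ _ _ _ hj]
  congr 1
  simp only [eq_iff_iff]
  constructor
  · rintro ⟨i, hi, h | h⟩ <;> rw [PySem.List.mem_pyRange_one] at hi <;> [left; right] <;> omega
  · rintro (h | h)
    · exact ⟨j, PySem.List.mem_pyRange_one.mpr ⟨h.1, h.2⟩, Or.inl rfl⟩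
    · exact ⟨(j:Int) - roles.length, PySem.List.mem_pyRange_one.mpr ⟨h.1, h.2⟩, Or.inr rfl⟩

theorem length_pvSpanWrite (roles : List String) (v : String) (s e : Int) :
    (pvSpanWrite roles v s e).length = roles.length :=
  length_foldl_pySetD _ _ _

theorem length_pvSpanPass (roles : List String) (v : String) (n : Int) (span : Option (List Int)) :
    (pvSpanPass roles v n span).length = roles.length := by
  cases span <;> simp [pvSpanPass, length_pvSpanWrite]

-- outside the wraparound region (¬ pvBadSpan) and under Pre_'s span shape, an A-side span
-- pass read back at j is exactly B's clipped-interval membership test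
theorem getElem?_pvSpanPass (roles : List String) (v : String) (n : Int) (span : Option (List Int))
    (j : Nat) (hj : j < roles.length) (hn : (roles.length : Int) = n)
    (hpre : pvSpanPre n span) (hok : ¬ pvBadSpan n span) :
    (pvSpanPass roles v n span)[j]? = if pvSpanCov n span j then some v else roles[j]? := by
  cases span with
  | none => simp [pvSpanPass, pvSpanCov]
  | some sp =>
    rw [pvSpanPass, getElem?_pvSpanWrite _ _ _ _ _ hj, hn]
    simp only [pvSpanPre] at hpre
    obtain ⟨hlen, hdis⟩ := hpre
    obtain ⟨a, b, rest, rfl⟩ : ∃ a b rest, sp = a :: b :: rest := by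
      match sp, hlen with
      | a :: b :: rest, _ => exact ⟨a, b, rest, rfl⟩
    simp only [pvBadSpan, pvBadSpanB, Bool.and_eq_true, decide_eq_true_eq, not_and, not_lt] at hok
    simp only [pvSpanCov, PySem.List.pyGetD_zero_cons,
      show ∀ (x : Int) (l : List Int), PySem.List.pyGetD (x :: l) 1 0 = l.getD 0 0 from
        fun x l => by simp [PySem.List.pyGetD_ofNat'],
      List.getD_cons_zero] at hdis ⊢
    split_ifs with h1 h2 h2 <;>
      [rfl;
       (exfalso; simp only [Bool.and_eq_true, decide_eq_true_eq, not_and, not_lt] at h2; omega);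
       (exfalso; simp only [Bool.and_eq_true, decide_eq_true_eq] at h2; omega);
       rfl]

-- ===== VERDICT (by name: the statements are the Claim_ definitions above) =====
theorem build_raw_roles_spec : Claim_unchanged_build_raw_roles := by
  intro tokens p user tmpl think sink _ hpre hnd
  obtain ⟨hp, hth, hsk⟩ := hpre
  have hndth : ¬ pvBadSpan (tokens.length : Int) think := fun h => hnd (Or.inl h)
  have hndsk : ¬ pvBadSpan (tokens.length : Int) sink := fun h => hnd (Or.inr h)
  apply List.ext_getElem?
  intro j
  simp only [build_raw_roles, build_raw_roles_alt]
  set lab : Int → String := fun i => if (PySem.Set.ofList user).contains i = true then "user" else if (PySem.Set.ofList tmpl).contains i = true then "template" else "prompt" with hlab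
  set R0 : List String := List.map (fun _ => "template") (PySem.List.pyRange 0 (tokens.length:Int)) with hR0
  set R1 : List String := List.foldl (fun r i => PySem.List.pySetD r i (lab i)) R0 (PySem.List.pyRange 0 (min (tokens.length:Int) p)) with hR1
  set R2 : List String := pvSpanWrite R1 "gen" p (tokens.length:Int) with hR2
  have l0 : R0.length = tokens.length := by simp [hR0, PySem.List.length_pyRange_one]
  have l1 : R1.length = tokens.length := by rw [hR1, length_foldl_pySetD, l0]
  have l2 : R2.length = tokens.length := by rw [hR2, length_pvSpanWrite, l1]
  have l3 : (pvSpanPass R2 "think" (tokens.length:Int) think).length = tokens.length := by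
    rw [length_pvSpanPass, l2]
  by_cases hj : j < tokens.length
  · have hjn : (j:Int) < (tokens.length:Int) := by exact_mod_cast hj
    rw [PySem.List.getElem?_map_pyRange_zero _ tokens.length j hj]
    rw [getElem?_pvSpanPass _ _ _ _ j (by rw [length_pvSpanPass, l2]; exact hj) (by rw [length_pvSpanPass, l2]) hsk hndsk]
    rw [getElem?_pvSpanPass _ _ _ _ j (by rw [l2]; exact hj) (by rw [l2]) hth hndth]
    rw [hR2, getElem?_pvSpanWrite _ _ _ _ j (by rw [l1]; exact hj)]
    rw [hR1, getElem?_foldl_pySetD_fun _ (fun i hi => (PySem.List.mem_pyRange_one.mp hi).1) _ lab j (by rw [l0]; exact hj)]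
    rw [hR0, PySem.List.getElem?_map_pyRange_zero _ tokens.length j hj]
    rw [length_foldl_pySetD, l0]
    simp only [PySem.List.mem_pyRange_one, Bool.or_eq_true, decide_eq_true_eq, hlab]
    split_ifs <;> first | rfl | omega
  · rw [List.getElem?_eq_none (by rw [length_pvSpanPass, l3]; omega),
       List.getElem?_eq_none (by simp only [List.length_map, PySem.List.length_pyRange_one]; omega)]

theorem build_raw_roles_changed : Claim_changed_build_raw_roles := by
  unfold Claim_changed_build_raw_roles; decide
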